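-- pv_equiv track=rewrite | github.com/CillianHourican/Synergistic-Networks | toy_symptom_model.py | generate_N_XOR_transitions_table
-- ===== SOURCE A (Python) =====
-- import itertools
--
-- def generate_N_XOR_transitions_table(graph, dependent_vars):
--     # N is the number of inputs in the XOR gate
--     # The output should be 1 if the number of inputs is ODD
--     #ToDo: allow for more then two dependent variables
--
--     # list of dependent vars
--     n = len(graph)
--
--     # Generate a list of lists
--     lst = [list(i) for i in itertools.product([0, 1], repeat=n)]
--
--     # Generate XOR
--     for _,i in enumerate(lst):
--         total = 0
--         for var in dependent_vars:
--             total += i[var]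
--         #if total ==0:
--         #    lst[_].append(0)
--         if total%2==1:
--             lst[_].append(1)
--         else:
--            lst[_].append(0)
--
--     return(lst)
-- ===== SOURCE B (Python) =====
-- def generate_N_XOR_transitions_table(graph, dependent_vars):
--     # Precompute a 0/1 parity mask over positions by toggling mask[v] for each
--     # dependent var, then grow the table by doubling: each pass extends every
--     # partial row by 0 and 1 and updates its parity from the mask, so no
--     # per-row scan of dependent_vars is needed.
--     n = len(graph)
--     mask = [0] * n
--     for v in dependent_vars:
--         mask[v] = 1 - mask[v]
--     rows = [([], 0)]
--     for m in mask:
--         rows = [(row + [b], (p + b * m) % 2) for row, p in rows for b in (0, 1)]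
--     return [row + [p] for row, p in rows]
-- ===== Notes on version B (the rewrite author's own statement) =====
-- stated objective: alternative
-- what changed: B first folds dependent_vars into a 0/1 parity mask over positions, then builds the table by iterative doubling of partial (row, parity) pairs, one pass per variable, so the per-row inner scan of dependent_vars disappears; A materializes itertools.product rows first and then loops over dependent_vars for each of the 2^n rows.
import Mathlib
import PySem

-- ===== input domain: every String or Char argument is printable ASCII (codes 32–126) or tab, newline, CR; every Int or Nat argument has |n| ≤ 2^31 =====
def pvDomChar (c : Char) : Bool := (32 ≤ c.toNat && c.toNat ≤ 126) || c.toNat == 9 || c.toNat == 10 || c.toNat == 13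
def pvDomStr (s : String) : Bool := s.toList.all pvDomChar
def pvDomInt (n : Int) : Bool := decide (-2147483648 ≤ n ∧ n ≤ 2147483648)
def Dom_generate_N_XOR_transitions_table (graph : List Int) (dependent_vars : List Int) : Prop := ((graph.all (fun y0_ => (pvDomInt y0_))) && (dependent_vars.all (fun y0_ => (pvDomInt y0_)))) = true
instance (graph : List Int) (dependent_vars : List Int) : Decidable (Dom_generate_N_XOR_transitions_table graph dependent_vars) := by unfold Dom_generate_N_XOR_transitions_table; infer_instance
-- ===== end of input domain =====

-- B replaces A's "enumerate product rows, then scan dependent_vars per row" with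
-- "fold dependent_vars once into a 0/1 parity mask, then build the table by iterative
-- doubling of (row, parity) pairs" (objective: alternative).

-- ===== PORT A =====
-- itertools.product([0,1], repeat=n), as a list of lists, lexicographic order
def pyProdBits : Nat → List (List Int)
  | 0 => [[]]
  | n + 1 => ([0, 1] : List Int).flatMap (fun b => (pyProdBits n).map (fun t => b :: t))

def generate_N_XOR_transitions_table (graph : List Int) (dependent_vars : List Int) : List (List Int) :=
  let lst := pyProdBits graph.length
  -- total += i[var]: pyGetD is exact under Pre_ (in-range indices); Python raises IndexError outside
  lst.map (fun i =>
    let total : Int := dependent_vars.foldl (fun t v => t + PySem.List.pyGetD i v 0) 0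
    if PySem.Int.mod total 2 == 1 then i ++ [(1 : Int)] else i ++ [(0 : Int)])

-- ===== PORT B =====
-- mask[v] = 1 - mask[v] per dependent var (Python indexing; pyGetD/pySetD exact under Pre_)
def pvMaskOf (n : Nat) (dvs : List Int) : List Int :=
  dvs.foldl (fun m v => PySem.List.pySetD m v (1 - PySem.List.pyGetD m v 0)) (List.replicate n 0)

-- rows = [(row + [b], (p + b * m) % 2) for row, p in rows for b in (0, 1)]
def pvStepB (rows : List (List Int × Int)) (m : Int) : List (List Int × Int) :=
  rows.flatMap (fun rp => ([0, 1] : List Int).map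
    (fun b => (rp.1 ++ [b], PySem.Int.mod (rp.2 + b * m) 2)))

def generate_N_XOR_transitions_table_alt (graph : List Int) (dependent_vars : List Int) : List (List Int) :=
  let n := graph.length
  let mask := pvMaskOf n dependent_vars
  let rows := mask.foldl pvStepB [([], 0)]
  rows.map (fun rp => rp.1 ++ [rp.2])

-- ===== PRECONDITION & SPEC =====
-- Pre_ excludes inputs where some dependent variable is out of range as a Python index
-- into a length-n row: there Python A raises IndexError (and Python B raises too).
def Pre_generate_N_XOR_transitions_table (graph : List Int) (dependent_vars : List Int) : Prop :=
  ∀ v ∈ dependent_vars, -(graph.length : Int) ≤ v ∧ v < graph.length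
instance (graph : List Int) (dependent_vars : List Int) : Decidable (Pre_generate_N_XOR_transitions_table graph dependent_vars) := by unfold Pre_generate_N_XOR_transitions_table; infer_instance

def pvWitness_generate_N_XOR_transitions_table : List Int × List Int := ([0, 0], [0, 1])

def Spec_generate_N_XOR_transitions_table (graph : List Int) (dependent_vars : List Int) (out : List (List Int)) : Prop := out = generate_N_XOR_transitions_table_alt graph dependent_vars
instance (graph : List Int) (dependent_vars : List Int) (out : List (List Int)) : Decidable (Spec_generate_N_XOR_transitions_table graph dependent_vars out) := by unfold Spec_generate_N_XOR_transitions_table; infer_instance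

-- ===== CLAIM (what is proved, stated in full; the proofs are below) =====
def Claim_equal_generate_N_XOR_transitions_table : Prop := ∀ (graph : List Int) (dependent_vars : List Int), Dom_generate_N_XOR_transitions_table graph dependent_vars → Pre_generate_N_XOR_transitions_table graph dependent_vars → Spec_generate_N_XOR_transitions_table graph dependent_vars (generate_N_XOR_transitions_table graph dependent_vars)

-- ===== LEMMAS AND PROOFS =====

-- weighted sum Σ t[i] * m[i] (the parity numerator carried by B's mask)
def pvSumw : List Int → List Int → Int
  | m :: ms, t :: ts => t * m + pvSumw ms ts
  | _, _ => 0

lemma pvSumw_nil (t : List Int) : pvSumw [] t = 0 := by cases t <;> rfl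

lemma pvSumw_replicate : ∀ (n : Nat) (t : List Int), pvSumw (List.replicate n 0) t = 0 := by
  intro n
  induction n with
  | zero => intro t; exact pvSumw_nil t
  | succ n ih =>
    intro t
    cases t with
    | nil => rfl
    | cons a ts => simp [List.replicate, pvSumw, ih]

lemma pvSumw_set : ∀ (k : Nat) (m t : List Int) (x : Int), m.length = t.length → k < t.length →
    pvSumw (m.set k x) t = pvSumw m t + (x - m.getD k 0) * t.getD k 0 := by
  intro k
  induction k with
  | zero =>
    intro m t x hl hk
    cases t with
    | nil => simp at hk
    | cons b ts =>
      cases m with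
      | nil => simp at hl
      | cons a ms => simp [pvSumw, List.getD]; ring
  | succ k ih =>
    intro m t x hl hk
    cases t with
    | nil => simp at hk
    | cons b ts =>
      cases m with
      | nil => simp at hl
      | cons a ms =>
        simp only [List.set, pvSumw, List.getD_cons_succ]
        rw [ih ms ts x (by simpa using hl) (by simpa using hk)]
        ring

lemma pvIdx_spec (n : Nat) (v : Int) (h1 : -(n : Int) ≤ v) (h2 : v < n) :
    ∃ k : Nat, k < n ∧ PySem.List.pyIdx? n v = some k := by
  unfold PySem.List.pyIdx?
  by_cases h : 0 ≤ v
  · exact ⟨v.toNat, by omega, by rw [if_pos h, if_pos h2]⟩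
  · rw [Int.not_le] at h
    refine ⟨n - (-v).toNat, by omega, ?_⟩
    rw [if_neg (by omega), if_pos h1]

lemma pvGetSet_norm (m t : List Int) (v : Int) (hl : m.length = t.length)
    (h1 : -(t.length : Int) ≤ v) (h2 : v < t.length) :
    ∃ k : Nat, k < t.length ∧
      PySem.List.pyGetD t v 0 = t.getD k 0 ∧
      PySem.List.pyGetD m v 0 = m.getD k 0 ∧
      (∀ x, PySem.List.pySetD m v x = m.set k x) := by
  obtain ⟨k, hk, hidx⟩ := pvIdx_spec t.length v h1 h2
  refine ⟨k, hk, ?_, ?_, ?_⟩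
  · simp [PySem.List.pyGetD, PySem.List.pyGet?, hidx, List.getElem?_eq_getElem hk]
  · simp [PySem.List.pyGetD, PySem.List.pyGet?, hl, hidx,
      List.getElem?_eq_getElem (hl ▸ hk : k < m.length)]
  · intro x
    simp [PySem.List.pySetD, PySem.List.pySet?, hl, hidx]

lemma pvMod_idem (x : Int) : PySem.Int.mod (PySem.Int.mod x 2) 2 = PySem.Int.mod x 2 := by
  rw [PySem.Int.mod_eq_emod_of_pos (by norm_num), PySem.Int.mod_eq_emod_of_pos (by norm_num)]
  omega

lemma pvMod_step (p x s : Int) :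
    PySem.Int.mod (PySem.Int.mod (p + x) 2 + s) 2 = PySem.Int.mod (p + (x + s)) 2 := by
  rw [PySem.Int.mod_eq_emod_of_pos (by norm_num), PySem.Int.mod_eq_emod_of_pos (by norm_num),
    PySem.Int.mod_eq_emod_of_pos (by norm_num)]
  omega

-- B's doubling loop, characterized against A's product rows
lemma pvFoldl_stepB : ∀ (ms : List Int) (rows : List (List Int × Int)),
    (∀ rp ∈ rows, PySem.Int.mod rp.2 2 = rp.2) →
    ms.foldl pvStepB rows
      = rows.flatMap (fun rp => (pyProdBits ms.length).map
          (fun t => (rp.1 ++ t, PySem.Int.mod (rp.2 + pvSumw ms t) 2))) := by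
  intro ms
  induction ms with
  | nil =>
    intro rows h
    simp only [List.foldl_nil, List.length_nil, pyProdBits, List.map_cons, List.map_nil]
    induction rows with
    | nil => rfl
    | cons rp rest ihr =>
      rw [List.flatMap_cons, ← ihr (fun q hq => h q (List.mem_cons_of_mem rp hq))]
      have hm := h rp (List.mem_cons_self)
      simp only [List.append_nil, pvSumw, add_zero, hm, List.singleton_append]
  | cons m ms ih =>
    intro rows h
    rw [List.foldl_cons, ih (pvStepB rows m) ?hmod]
    case hmod =>
      intro rp hrp
      simp only [pvStepB, List.mem_flatMap, List.mem_map] at hrp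
      obtain ⟨q, _, b, _, rfl⟩ := hrp
      exact pvMod_idem _
    show (pvStepB rows m).flatMap _ = _
    rw [pvStepB, List.flatMap_assoc]
    congr 1
    funext rp
    rw [List.flatMap_map]
    simp only [List.length_cons, pyProdBits, List.flatMap_cons, List.flatMap_nil,
      List.append_nil, List.map_append, List.map_map]
    congr 1 <;>
    · refine congrArg (fun f => List.map f (pyProdBits ms.length)) ?_
      funext t
      simp only [Function.comp, List.append_assoc, List.singleton_append, pvSumw, pvMod_step]

-- A's dependent_vars scan has the same parity as B's mask
lemma pvPar : ∀ (dvs : List Int) (m t : List Int) (acc : Int),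
    m.length = t.length →
    (∀ v ∈ dvs, -(t.length : Int) ≤ v ∧ v < (t.length : Int)) →
    (dvs.foldl (fun a v => a + PySem.List.pyGetD t v 0) acc + pvSumw m t) % 2
      = (acc + pvSumw (dvs.foldl
          (fun mm v => PySem.List.pySetD mm v (1 - PySem.List.pyGetD mm v 0)) m) t) % 2 := by
  intro dvs
  induction dvs with
  | nil => intro m t acc _ _; simp
  | cons v dvs ih =>
    intro m t acc hl hv
    obtain ⟨k, hk, hgt, hgm, hset⟩ :=
      pvGetSet_norm m t v hl (hv v (List.mem_cons_self)).1 (hv v (List.mem_cons_self)).2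
    simp only [List.foldl_cons, hgt, hset]
    have hl' : (m.set k (1 - PySem.List.pyGetD m v 0)).length = t.length := by
      simpa using hl
    have hIH := ih (m.set k (1 - PySem.List.pyGetD m v 0)) t (acc + t.getD k 0) hl'
      (fun w hw => hv w (List.mem_cons_of_mem v hw))
    have hS : pvSumw (m.set k (1 - PySem.List.pyGetD m v 0)) t
        = pvSumw m t + t.getD k 0 - 2 * (m.getD k 0 * t.getD k 0) := by
      rw [pvSumw_set k m t _ hl hk]
      rw [hgm]
      ring
    generalize m.getD k 0 * t.getD k 0 = P at hS
    omega

lemma pvProdBits_length : ∀ (n : Nat), ∀ t ∈ pyProdBits n, t.length = n := by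
  intro n
  induction n with
  | zero => intro t ht; simp [pyProdBits] at ht; simp [ht]
  | succ n ih =>
    intro t ht
    simp only [pyProdBits, List.mem_flatMap, List.mem_map] at ht
    obtain ⟨b, _, t', ht', rfl⟩ := ht
    simp [ih t' ht']

lemma pvToggle_length : ∀ (dvs : List Int) (m : List Int),
    (dvs.foldl (fun mm v => PySem.List.pySetD mm v (1 - PySem.List.pyGetD mm v 0)) m).length
      = m.length := by
  intro dvs
  induction dvs with
  | nil => intro m; rfl
  | cons v dvs ih =>
    intro m
    rw [List.foldl_cons, ih, PySem.List.length_pySetD]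

lemma pvMask_length (n : Nat) (dvs : List Int) : (pvMaskOf n dvs).length = n := by
  unfold pvMaskOf
  rw [pvToggle_length, List.length_replicate]

-- ===== VERDICT (by name: the statement is the Claim_ definition above) =====
theorem generate_N_XOR_transitions_table_spec : Claim_equal_generate_N_XOR_transitions_table := by
  intro graph dvs _ hpre
  unfold Spec_generate_N_XOR_transitions_table
  simp only [generate_N_XOR_transitions_table, generate_N_XOR_transitions_table_alt]
  rw [pvFoldl_stepB (pvMaskOf graph.length dvs) [([], 0)] (by intro rp hrp; simp at hrp; subst hrp; decide)]
  simp only [List.flatMap_cons, List.flatMap_nil, List.append_nil, List.map_map,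
    List.nil_append, pvMask_length]
  apply List.map_congr_left
  intro t ht
  have hlen : t.length = graph.length := pvProdBits_length graph.length t ht
  have hpar := pvPar dvs (List.replicate graph.length 0) t 0
    (by simp [hlen]) (by intro v hv; have := hpre v hv; omega)
  rw [pvSumw_replicate] at hpar
  simp only [Function.comp, zero_add, add_zero] at hpar ⊢
  rw [PySem.Int.mod_eq_emod_of_pos (by norm_num : (0:Int) < 2),
    PySem.Int.mod_eq_emod_of_pos (by norm_num : (0:Int) < 2)]
  simp only [pvMaskOf]
  rw [hpar]
  set s : Int := pvSumw (dvs.foldl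
    (fun mm v => PySem.List.pySetD mm v (1 - PySem.List.pyGetD mm v 0))
    (List.replicate graph.length 0)) t with hs
  have h2 : s % 2 = 0 ∨ s % 2 = 1 := by omega
  rcases h2 with h | h <;> simp [h]
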